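-- pv_equiv track=rewrite | github.com/yuukisabu0310/fundamental-engine | scripts/analysis/classify_null_reasons.py | _has_tag_in_facts
-- ===== SOURCE A (Python) =====
-- def _tag_local(tag: str) -> str:
--     return tag.split(":")[-1] if ":" in tag else tag
--
-- def _has_tag_in_facts(facts: list[dict], patterns: list[str]) -> list[str]:
--     """raw facts に patterns のいずれかを含むタグが存在するか。見つかったパターンを返す。"""
--     found: list[str] = []
--     for pat in patterns:
--         for f in facts:
--             if pat in _tag_local(f.get("tag", "")):
--                 found.append(pat)
--                 break
--     return found
-- ===== SOURCE B (Python) =====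
-- def _tag_local(tag: str) -> str:
--     return tag.split(":")[-1] if ":" in tag else tag
--
-- def _has_tag_in_facts(facts: list[dict], patterns: list[str]) -> list[str]:
--     """Single pass over facts: keep a set of still-unseen patterns, mark the ones
--     found in each fact's local tag, stop early once all are found; finally
--     restore pattern order (and duplicates) by filtering patterns."""
--     remaining = set(patterns)
--     found: set[str] = set()
--     for f in facts:
--         if not remaining:
--             break
--         tag = _tag_local(f.get("tag", ""))
--         hits = {p for p in remaining if p in tag}
--         found |= hits
--         remaining -= hits
--     return [p for p in patterns if p in found]
-- ===== Notes on version B (the rewrite author's own statement) =====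
-- stated objective: faster
-- what changed: B scans the facts once, computing each fact's local tag a single time and maintaining remaining/found pattern sets with an early exit once every pattern is found, then restores the original pattern order (and duplicates) by a final filter; A loops over patterns and re-splits every fact's tag for each pattern.
import Mathlib
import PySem

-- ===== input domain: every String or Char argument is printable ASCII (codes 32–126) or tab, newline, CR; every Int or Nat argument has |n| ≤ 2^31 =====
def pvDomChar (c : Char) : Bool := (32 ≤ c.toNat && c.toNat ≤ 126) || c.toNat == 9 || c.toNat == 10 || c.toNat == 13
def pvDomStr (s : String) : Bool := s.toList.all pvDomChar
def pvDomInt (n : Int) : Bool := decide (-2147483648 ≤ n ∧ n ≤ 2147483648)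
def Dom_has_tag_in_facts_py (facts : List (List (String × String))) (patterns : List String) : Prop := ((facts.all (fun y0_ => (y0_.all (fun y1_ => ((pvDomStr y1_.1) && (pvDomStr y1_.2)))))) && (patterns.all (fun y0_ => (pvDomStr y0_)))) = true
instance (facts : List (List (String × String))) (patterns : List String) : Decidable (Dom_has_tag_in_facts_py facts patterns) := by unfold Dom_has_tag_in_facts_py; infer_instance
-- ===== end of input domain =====

-- B keeps remaining/found pattern sets over a single facts scan with early exit, then filters
-- patterns to restore order; same return value as A (measurably faster: each tag split once, early exit).

-- shared helper: _tag_local (identical in both Python sources)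
def pvTagLocal (tag : String) : String :=
  if PySem.Str.isIn ":" tag then
    PySem.List.pyGetD ((PySem.Str.split? tag ":").getD []) (-1) ""
  else tag

-- f.get("tag", "") on the association-list dict
def pvGetTag (f : List (String × String)) : String := (f.lookup "tag").getD ""

-- ===== PORT A =====
def has_tag_in_facts_py (facts : List (List (String × String))) (patterns : List String) : List String :=
  patterns.foldl (fun found pat =>
    if facts.any (fun f => PySem.Str.isIn pat (pvTagLocal (pvGetTag f))) then
      found ++ [pat]
    else found) []

-- ===== PORT B =====
def pvBScan (facts : List (List (String × String))) (remaining found : PySem.Set String) :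
    PySem.Set String :=
  match facts with
  | [] => found
  | f :: rest =>
    if remaining.isEmpty then found
    else
      let tag := pvTagLocal (pvGetTag f)
      let hits : PySem.Set String := remaining.filter (fun p => PySem.Str.isIn p tag)
      pvBScan rest (PySem.Set.diff remaining hits) (PySem.Set.union found hits)

def has_tag_in_facts_py_alt (facts : List (List (String × String))) (patterns : List String) : List String :=
  let found := pvBScan facts (PySem.Set.ofList patterns) PySem.Set.empty
  patterns.filter (fun p => PySem.Set.contains found p)

-- ===== PRECONDITION & SPEC =====
def Spec_has_tag_in_facts_py (facts : List (List (String × String))) (patterns : List String) (out : List String) : Prop := out = has_tag_in_facts_py_alt facts patterns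
instance (facts : List (List (String × String))) (patterns : List String) (out : List String) : Decidable (Spec_has_tag_in_facts_py facts patterns out) := by unfold Spec_has_tag_in_facts_py; infer_instance

-- ===== CLAIM (what is proved, stated in full; the proofs are below) =====
def Claim_equal_has_tag_in_facts_py : Prop := ∀ (facts : List (List (String × String))) (patterns : List String), Dom_has_tag_in_facts_py facts patterns → Spec_has_tag_in_facts_py facts patterns (has_tag_in_facts_py facts patterns)

-- ===== LEMMAS AND PROOFS =====

-- characterisation of B's scan: membership in the final found set
theorem mem_pvBScan (facts : List (List (String × String))) (remaining found : PySem.Set String)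
    (x : String) :
    x ∈ pvBScan facts remaining found ↔
      x ∈ found ∨ (x ∈ remaining ∧
        facts.any (fun f => PySem.Str.isIn x (pvTagLocal (pvGetTag f))) = true) := by
  induction facts generalizing remaining found with
  | nil => simp [pvBScan]
  | cons f rest ih =>
    by_cases h : remaining.isEmpty
    · have : remaining = [] := List.isEmpty_iff.mp h
      simp [pvBScan, h, this]
    · simp only [pvBScan, h, if_neg, Bool.false_eq_true, not_false_iff, ite_false]
      rw [ih]
      simp only [PySem.Set.mem_union, PySem.Set.mem_diff, List.mem_filter, List.any_cons,
        Bool.or_eq_true]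
      tauto

-- ===== VERDICT (by name: the statement is the Claim_ definition above) =====
theorem has_tag_in_facts_py_spec : Claim_equal_has_tag_in_facts_py := by
  intro facts patterns _
  unfold Spec_has_tag_in_facts_py has_tag_in_facts_py has_tag_in_facts_py_alt
  rw [PySem.List.foldl_append_if
    (fun pat => facts.any (fun f => PySem.Str.isIn pat (pvTagLocal (pvGetTag f))))
    (fun pat => pat) patterns []]
  simp only [List.nil_append, List.map_id']
  apply List.filter_congr
  intro p hp
  rw [Bool.eq_iff_iff, PySem.Set.contains_iff, mem_pvBScan]
  simp [PySem.Set.empty, PySem.Set.mem_ofList, hp]
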